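-- pv_equiv track=rewrite | github.com/prosowiec/bonds | monte.py | get_annualBondReturn
-- ===== SOURCE A (Python) =====
-- def get_annualBondReturn(modelDic, peroid):
--     annualBondReturn = {}
--
--     for symbol in modelDic.keys():
--         mothDic = {}
--         bond = modelDic[symbol]
--
--         for symumaltion in range(0, len(bond)):
--             one_symumaltion = bond[symumaltion]
--
--             for i in range(0, len(one_symumaltion)):
--                 if i not in mothDic.keys():
--                     mothDic[i] = [one_symumaltion[i]]
--                 else:
--                     mothDic[i].append(one_symumaltion[i])
--
--         yearData = {}
--         j = 1
--         for i in range(0, peroid):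
--             if (i + 1) % 12 == 0:
--                 yearData[j] = mothDic[i]
--                 j += 1
--
--         annualBondReturn[symbol] = yearData
--
--     return annualBondReturn
-- ===== SOURCE B (Python) =====
-- def get_annualBondReturn(modelDic, peroid):
--     year_idx = [i for i in range(peroid) if (i + 1) % 12 == 0]
--     return {symbol: {j: [sim[i] for sim in bond if i < len(sim)]
--                      for j, i in enumerate(year_idx, 1)}
--             for symbol, bond in modelDic.items()}
-- ===== Notes on version B (the rewrite author's own statement) =====
-- stated objective: faster
-- what changed: B drops the full per-month grouping dict entirely: it computes the year-end month indices once and materializes only those columns by direct indexing into each simulation, instead of A's pass over every entry of every simulation followed by a selection loop.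
import Mathlib
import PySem

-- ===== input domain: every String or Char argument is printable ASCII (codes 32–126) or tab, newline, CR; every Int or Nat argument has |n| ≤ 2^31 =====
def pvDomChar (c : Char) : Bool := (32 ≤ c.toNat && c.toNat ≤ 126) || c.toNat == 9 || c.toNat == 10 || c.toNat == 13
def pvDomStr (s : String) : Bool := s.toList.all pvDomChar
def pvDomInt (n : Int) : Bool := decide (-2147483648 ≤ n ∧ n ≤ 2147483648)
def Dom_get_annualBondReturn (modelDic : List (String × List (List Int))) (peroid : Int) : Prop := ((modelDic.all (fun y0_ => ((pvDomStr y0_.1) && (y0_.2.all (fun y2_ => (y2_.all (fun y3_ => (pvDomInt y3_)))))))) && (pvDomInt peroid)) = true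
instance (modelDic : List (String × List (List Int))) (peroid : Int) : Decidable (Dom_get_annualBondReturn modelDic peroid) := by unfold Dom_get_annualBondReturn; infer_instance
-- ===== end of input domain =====

-- B drops A's full per-month grouping dict and materializes only the year-end columns by direct
-- indexing into each simulation (objective: faster — only the needed columns are touched).


-- ===== PORT A =====
-- inner loop 'for i in range(0, len(one_symumaltion)): if i not in mothDic: mothDic[i]=[x] else: mothDic[i].append(x)'
def pvSimFold (md : PySem.Dict Int (List Int)) (sim : List Int) : PySem.Dict Int (List Int) :=
  (PySem.List.pyRange 0 (sim.length : Int) 1).foldl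
    (fun md i =>
      if (md.contains i) = false then md.insert i [PySem.List.pyGetD sim i 0]
      else md.insert i (md.getD i [] ++ [PySem.List.pyGetD sim i 0]))
    md

-- per-symbol body of A's outer loop (build mothDic, then the yearData counter loop);
-- mothDic[i] is ported as (get? i).getD []: Pre_ guarantees the key is present (else Python raises KeyError)
def pvSymbolA (bond : List (List Int)) (peroid : Int) : List (Int × List Int) :=
  let mothDic : PySem.Dict Int (List Int) := bond.foldl pvSimFold PySem.Dict.empty
  ((PySem.List.pyRange 0 peroid 1).foldl
      (fun (p : PySem.Dict Int (List Int) × Int) i =>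
        if PySem.Int.mod (i + 1) 12 == 0 then (p.1.insert p.2 ((mothDic.get? i).getD []), p.2 + 1)
        else p)
      (PySem.Dict.empty, 1)).1.items

def get_annualBondReturn (modelDic : List (String × List (List Int))) (peroid : Int) : List (String × List (Int × List Int)) :=
  (modelDic.foldl
      (fun (acc : PySem.Dict String (List (Int × List Int))) sb => acc.insert sb.1 (pvSymbolA sb.2 peroid))
      PySem.Dict.empty).items

-- ===== PORT B =====
-- '[sim[i] for sim in bond if i < len(sim)]'
def pvColB (bond : List (List Int)) (i : Int) : List Int :=
  (bond.filter (fun sim => decide (i < (sim.length : Int)))).map (fun sim => PySem.List.pyGetD sim i 0)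

def get_annualBondReturn_alt (modelDic : List (String × List (List Int))) (peroid : Int) : List (String × List (Int × List Int)) :=
  let yearIdx := (PySem.List.pyRange 0 peroid 1).filter (fun i => PySem.Int.mod (i + 1) 12 == 0)
  modelDic.map (fun sb => (sb.1, (yearIdx.zipIdx 1).map (fun p => ((p.2 : Int), pvColB sb.2 p.1))))

-- ===== PRECONDITION & SPEC =====
-- Pre_ excludes (a) association lists with duplicate symbol keys, on which the Python dict argument
-- merges entries (a defensible-corner artefact of the dict encoding), and (b) inputs where some needed
-- year-end month index is reached by no simulation of a symbol, on which A raises KeyError.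
def Pre_get_annualBondReturn (modelDic : List (String × List (List Int))) (peroid : Int) : Prop :=
  (modelDic.map (·.1)).Nodup ∧
  ∀ p ∈ modelDic, peroid < 12 ∨ ∃ sim ∈ p.2, 12 * PySem.Int.floordiv peroid 12 ≤ (sim.length : Int)
instance (modelDic : List (String × List (List Int))) (peroid : Int) : Decidable (Pre_get_annualBondReturn modelDic peroid) := by unfold Pre_get_annualBondReturn; infer_instance

def pvWitness_get_annualBondReturn : (List (String × List (List Int))) × Int :=
  ([("a", [[1, 2, 3, 4, 5, 6, 7, 8, 9, 10, 11, 12], [1, 2]]), ("b", [[0, 0, 0, 0, 0, 0, 0, 0, 0, 0, 0, 9]])], 12)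

def Spec_get_annualBondReturn (modelDic : List (String × List (List Int))) (peroid : Int) (out : List (String × List (Int × List Int))) : Prop := out = get_annualBondReturn_alt modelDic peroid
instance (modelDic : List (String × List (List Int))) (peroid : Int) (out : List (String × List (Int × List Int))) : Decidable (Spec_get_annualBondReturn modelDic peroid out) := by unfold Spec_get_annualBondReturn; infer_instance

-- ===== CLAIM (what is proved, stated in full; the proofs are below) =====
def Claim_equal_get_annualBondReturn : Prop := ∀ (modelDic : List (String × List (List Int))) (peroid : Int), Dom_get_annualBondReturn modelDic peroid → Pre_get_annualBondReturn modelDic peroid → Spec_get_annualBondReturn modelDic peroid (get_annualBondReturn modelDic peroid)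

-- ===== LEMMAS AND PROOFS =====

-- one step of the inner month loop, seen through getD
theorem pvStep_getD (md : PySem.Dict Int (List Int)) (sim : List Int) (i k : Int) :
    ((if (md.contains i) = false then md.insert i [PySem.List.pyGetD sim i 0]
      else md.insert i (md.getD i [] ++ [PySem.List.pyGetD sim i 0])).getD k [])
    = (if k = i then md.getD k [] ++ [PySem.List.pyGetD sim i 0] else md.getD k []) := by
  by_cases h : md.contains i = false <;>
    simp [h, PySem.Dict.getD_insert] <;> split_ifs with hk <;>
      simp_all [PySem.Dict.getD_of_not_contains]

-- one simulation appends its entry at every month index it reaches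
theorem pvRangeFold_getD (sim : List Int) (n : Nat) : ∀ (md : PySem.Dict Int (List Int)) (k : Int), 0 ≤ k →
    ((PySem.List.pyRange 0 (n : Int) 1).foldl
      (fun md i =>
        if (md.contains i) = false then md.insert i [PySem.List.pyGetD sim i 0]
        else md.insert i (md.getD i [] ++ [PySem.List.pyGetD sim i 0])) md).getD k []
    = md.getD k [] ++ (if k < (n : Int) then [PySem.List.pyGetD sim k 0] else []) := by
  induction n with
  | zero => intro md k hk; simp [PySem.List.pyRange]; omega
  | succ m ih =>
    intro md k hk
    rw [show ((m + 1 : Nat) : Int) = (m : Int) + 1 by push_cast; ring,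
        PySem.List.pyRange_one_succ_right (by positivity), List.foldl_append]
    simp only [List.foldl_cons, List.foldl_nil]
    rw [pvStep_getD, ih md k hk]
    by_cases hkm : k = (m : Int) <;> simp [hkm] <;> split_ifs <;> simp_all <;> omega

theorem pvSimFold_getD (sim : List Int) (md : PySem.Dict Int (List Int)) (k : Int) (hk : 0 ≤ k) :
    (pvSimFold md sim).getD k []
    = md.getD k [] ++ (if k < (sim.length : Int) then [PySem.List.pyGetD sim k 0] else []) :=
  pvRangeFold_getD sim sim.length md k hk

-- the whole grouping loop: mothDic's column at k is exactly B's direct column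
theorem pvBondFold_getD (bond : List (List Int)) : ∀ (md : PySem.Dict Int (List Int)) (k : Int), 0 ≤ k →
    (bond.foldl pvSimFold md).getD k [] = md.getD k [] ++ pvColB bond k := by
  induction bond with
  | nil => intro md k hk; simp [pvColB]
  | cons sim rest ih =>
    intro md k hk
    simp only [List.foldl_cons]
    rw [ih _ k hk, pvSimFold_getD sim md k hk, pvColB, pvColB, List.filter_cons]
    split_ifs with h <;> simp_all <;> omega

-- the counter loop over fresh increasing keys builds exactly the enumerate of the filtered list
theorem pvYearFold (cond : Int → Bool) (col : Int → List Int) :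
    ∀ (l : List Int) (d : PySem.Dict Int (List Int)) (jn : Nat),
      (∀ p ∈ d.items, p.1 < (jn : Int)) →
      ((l.foldl (fun (p : PySem.Dict Int (List Int) × Int) i =>
          if cond i then (p.1.insert p.2 (col i), p.2 + 1) else p) (d, (jn : Int))).1).items
      = d.items ++ ((l.filter cond).zipIdx jn).map (fun p => ((p.2 : Int), col p.1)) := by
  intro l
  induction l with
  | nil => intro d jn h; simp
  | cons a rest ih =>
    intro d jn h
    simp only [List.foldl_cons, List.filter_cons]
    by_cases hc : cond a
    · have hnc : d.contains ((jn : Int)) = false := by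
        cases hcc : d.contains ((jn : Int)) with
        | false => rfl
        | true =>
          exfalso
          have hmem : (jn : Int) ∈ d.keys := (PySem.Dict.contains_iff_mem_keys d _).1 hcc
          simp only [PySem.Dict.keys, List.mem_map] at hmem
          obtain ⟨p, hp, hp1⟩ := hmem
          have := h p hp; omega
      have hins := PySem.Dict.items_insert_of_not_contains d (col a) hnc
      have hcast : ((jn : Int) + 1) = ((jn + 1 : Nat) : Int) := by push_cast; ring
      simp only [hc, if_true, hcast]
      rw [ih (d.insert (jn : Int) (col a)) (jn + 1) (by
        intro p hp
        rw [hins] at hp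
        rcases List.mem_append.1 hp with h1 | h1
        · have := h p h1; push_cast; omega
        · simp only [List.mem_singleton] at h1
          rw [h1]
          push_cast; simp), hins]
      simp [List.zipIdx_cons, List.append_assoc]
    · simp only [Bool.not_eq_true] at hc
      simp only [hc, Bool.false_eq_true, if_false]
      rw [ih d jn h]

-- A's per-symbol result is B's: enumerate of the year-end indices with the direct columns
theorem pvSymbol_eq (bond : List (List Int)) (peroid : Int) :
    pvSymbolA bond peroid
    = (((PySem.List.pyRange 0 peroid 1).filter (fun i => PySem.Int.mod (i + 1) 12 == 0)).zipIdx 1).map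
        (fun p => ((p.2 : Int), pvColB bond p.1)) := by
  have key := pvYearFold (fun i => PySem.Int.mod (i + 1) 12 == 0)
      (fun i => (((bond.foldl pvSimFold PySem.Dict.empty).get? i).getD []))
      (PySem.List.pyRange 0 peroid 1) PySem.Dict.empty 1
      (by intro p hp; simp [PySem.Dict.empty, PySem.Dict.items] at hp)
  simp only [Nat.cast_one] at key
  unfold pvSymbolA
  simp only [key, List.nil_append]
  apply List.map_congr_left
  intro p hp
  have hmem : p.1 ∈ (PySem.List.pyRange 0 peroid 1).filter (fun i => PySem.Int.mod (i + 1) 12 == 0) :=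
    List.fst_mem_of_mem_zipIdx hp
  have hpos : 0 ≤ p.1 := by
    have := (PySem.List.mem_pyRange_one).1 (List.mem_of_mem_filter hmem)
    omega
  have hcol : ((bond.foldl pvSimFold PySem.Dict.empty).get? p.1).getD []
      = pvColB bond p.1 := by
    rw [← PySem.Dict.getD_eq_get?_getD, pvBondFold_getD bond PySem.Dict.empty p.1 hpos]
    simp [PySem.Dict.getD_empty]
  rw [hcol]

-- ===== VERDICT (by name: the statement is the Claim_ definition above) =====
theorem get_annualBondReturn_spec : Claim_equal_get_annualBondReturn := by
  intro modelDic peroid _ hpre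
  unfold Spec_get_annualBondReturn get_annualBondReturn get_annualBondReturn_alt
  rw [PySem.Dict.items_foldl_insert_fresh modelDic (·.1) (fun sb => pvSymbolA sb.2 peroid)
      PySem.Dict.empty (by intro a _; simp [PySem.Dict.contains_empty]) hpre.1]
  simp only [PySem.Dict.empty, PySem.Dict.items, List.nil_append]
  apply List.map_congr_left
  intro sb _
  simp [pvSymbol_eq]
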